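-- pv_equiv track=rewrite | github.com/Turbo31150/jarvis-core | core/jarvis_checkpoint_manager.py | _state_diff
-- ===== SOURCE A (Python) =====
-- def _state_diff(base: dict, current: dict) -> dict:
--     """Compute keys that changed/added/deleted vs base."""
--     diff = {}
--     all_keys = set(base.keys()) | set(current.keys())
--     for key in all_keys:
--         base_val = base.get(key)
--         curr_val = current.get(key)
--         if base_val != curr_val:
--             diff[key] = curr_val  # None means deleted
--     return diff
-- ===== SOURCE B (Python) =====
-- def _state_diff(base: dict, current: dict) -> dict:
--     """Changed/deleted keys from base, then added non-None keys from current."""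
--     diff = {k: current.get(k) for k, v in base.items() if current.get(k) != v}
--     for k, v in current.items():
--         if k not in base and v is not None:
--             diff[k] = v
--     return diff
-- ===== Notes on version B (the rewrite author's own statement) =====
-- stated objective: simpler
-- what changed: B drops A's union-of-key-sets pass and instead makes two direct passes: one over base collecting changed/deleted keys (comparing each value with current.get), one over current appending added non-None keys; no key set is ever built.
import Mathlib
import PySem

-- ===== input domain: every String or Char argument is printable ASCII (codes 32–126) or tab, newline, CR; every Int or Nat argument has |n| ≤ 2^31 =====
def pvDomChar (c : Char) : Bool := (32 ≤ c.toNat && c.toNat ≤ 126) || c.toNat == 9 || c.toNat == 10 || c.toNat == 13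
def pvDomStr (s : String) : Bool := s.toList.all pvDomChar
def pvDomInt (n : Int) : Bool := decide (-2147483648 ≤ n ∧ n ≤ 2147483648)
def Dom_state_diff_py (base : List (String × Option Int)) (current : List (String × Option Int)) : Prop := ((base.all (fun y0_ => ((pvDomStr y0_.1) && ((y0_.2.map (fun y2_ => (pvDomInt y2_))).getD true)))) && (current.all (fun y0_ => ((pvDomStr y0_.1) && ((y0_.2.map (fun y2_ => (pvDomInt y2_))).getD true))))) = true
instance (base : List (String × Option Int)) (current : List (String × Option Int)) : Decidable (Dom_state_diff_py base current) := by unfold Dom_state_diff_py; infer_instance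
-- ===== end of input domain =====

-- B replaces A's union-of-key-sets pass with two direct passes (changed/deleted over base, added over current); same return value (dict equality ignores insertion order, A's set-iteration order is unspecified); objective: simpler, not faster.

-- ===== PORT A =====
-- A: diff = {}; for key in set(base)|set(current): if base.get(key) != current.get(key): diff[key] = current.get(key)
def state_diff_py (base : List (String × Option Int)) (current : List (String × Option Int)) : List (String × Option Int) :=
  let b := PySem.Dict.ofList base
  let c := PySem.Dict.ofList current
  let allKeys := PySem.Set.union (PySem.Set.ofList (PySem.Dict.keys b)) (PySem.Set.ofList (PySem.Dict.keys c))
  (allKeys.foldl (fun d key =>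
      let base_val := PySem.Dict.getD b key none
      let curr_val := PySem.Dict.getD c key none
      if base_val ≠ curr_val then d.insert key curr_val else d)
    PySem.Dict.empty).items

-- ===== PORT B =====
-- B: diff = {k: current.get(k) for k, v in base.items() if current.get(k) != v};
--    for k, v in current.items(): if k not in base and v is not None: diff[k] = v
def state_diff_py_alt (base : List (String × Option Int)) (current : List (String × Option Int)) : List (String × Option Int) :=
  let b := PySem.Dict.ofList base
  let c := PySem.Dict.ofList current
  let diff := b.items.foldl (fun d kv =>
      if PySem.Dict.getD c kv.1 none ≠ kv.2 then d.insert kv.1 (PySem.Dict.getD c kv.1 none) else d)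
    PySem.Dict.empty
  (c.items.foldl (fun d kv =>
      if PySem.Dict.contains b kv.1 = false ∧ kv.2 ≠ none then d.insert kv.1 kv.2 else d)
    diff).items

-- ===== PRECONDITION & SPEC =====
def Spec_state_diff_py (base : List (String × Option Int)) (current : List (String × Option Int)) (out : List (String × Option Int)) : Prop := out = state_diff_py_alt base current
instance (base : List (String × Option Int)) (current : List (String × Option Int)) (out : List (String × Option Int)) : Decidable (Spec_state_diff_py base current out) := by unfold Spec_state_diff_py; infer_instance

-- ===== CLAIM (what is proved, stated in full; the proofs are below) =====
def Claim_equal_state_diff_py : Prop := ∀ (base : List (String × Option Int)) (current : List (String × Option Int)), Dom_state_diff_py base current → Spec_state_diff_py base current (state_diff_py base current)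

-- ===== LEMMAS AND PROOFS =====

-- A conditional-insert loop over pairwise-distinct fresh keys appends the filtered pairs.
theorem items_foldl_insert_if {κ ν α : Type} [BEq κ] [LawfulBEq κ]
    (p : α → Prop) [DecidablePred p] (key : α → κ) (val : α → ν) (l : List α) (d : PySem.Dict κ ν)
    (hnd : ((l.filter (fun a => decide (p a))).map key).Nodup)
    (hfresh : ∀ a ∈ l, p a → d.contains (key a) = false) :
    (l.foldl (fun d a => if p a then d.insert (key a) (val a) else d) d).items
      = d.items ++ (l.filter (fun a => decide (p a))).map (fun a => (key a, val a)) := by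
  induction l generalizing d with
  | nil => simp
  | cons a l ih =>
    by_cases hp : p a
    · simp only [List.filter_cons, hp, decide_true, if_pos] at hnd
      rw [List.map_cons, List.nodup_cons] at hnd
      obtain ⟨hna, hnd'⟩ := hnd
      have hda : d.contains (key a) = false := hfresh a List.mem_cons_self hp
      have hfresh' : ∀ b ∈ l, p b → (d.insert (key a) (val a)).contains (key b) = false := by
        intro b hb hpb
        rw [PySem.Dict.contains_insert]
        have hne : (key b == key a) = false := by
          simp only [beq_eq_false_iff_ne]
          intro h
          exact hna (h ▸ List.mem_map_of_mem (List.mem_filter.2 ⟨hb, by simpa using hpb⟩))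
        simp [hne, hfresh b (List.mem_cons_of_mem _ hb) hpb]
      simp only [List.foldl_cons]
      rw [if_pos hp, ih (d.insert (key a) (val a)) hnd' hfresh']
      rw [PySem.Dict.items_insert, hda]
      simp [hp]
    · simp only [List.filter_cons, hp, decide_false] at hnd ⊢
      simp only [List.foldl_cons]
      rw [if_neg hp]
      rw [ih d hnd (fun b hb hpb => hfresh b (List.mem_cons_of_mem _ hb) hpb)]
      simp

-- Folding Set.add over a nodup list appends the not-yet-present elements.
theorem foldl_add_eq_append {α : Type} [BEq α] [LawfulBEq α] [DecidableEq α]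
    (t : List α) (s : List α) (ht : t.Nodup) :
    t.foldl PySem.Set.add s = s ++ t.filter (fun x => decide (x ∉ s)) := by
  induction t generalizing s with
  | nil => simp
  | cons a t ih =>
    simp only [List.foldl_cons, List.filter_cons]
    by_cases ha : a ∈ s
    · have : PySem.Set.add s a = s := by
        simp [PySem.Set.add, PySem.Set.contains, ha]
      rw [this, ih _ ht.of_cons]
      simp [ha]
    · have hadd : PySem.Set.add s a = s ++ [a] := by
        simp [PySem.Set.add, PySem.Set.contains, ha]
      rw [hadd, ih _ ht.of_cons]
      have hat : a ∉ t := (List.nodup_cons.1 ht).1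
      have hfe : t.filter (fun x => decide (x ∉ s ++ [a])) = t.filter (fun x => decide (x ∉ s)) := by
        apply List.filter_congr
        intro x hx
        have : x ≠ a := fun h => hat (h ▸ hx)
        simp [this]
      rw [hfe]
      simp [ha]

theorem state_diff_eq (base current : List (String × Option Int)) :
    state_diff_py base current = state_diff_py_alt base current := by
  unfold state_diff_py state_diff_py_alt
  dsimp only
  set b := PySem.Dict.ofList base with hb
  set c := PySem.Dict.ofList current with hc
  have hbnd : b.keys.Nodup := PySem.Dict.nodup_keys_ofList base
  have hcnd : c.keys.Nodup := PySem.Dict.nodup_keys_ofList current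
  have hofb : PySem.Set.ofList b.keys = b.keys := PySem.Set.ofList_eq_self_of_nodup b.keys hbnd
  have hofc : PySem.Set.ofList c.keys = c.keys := PySem.Set.ofList_eq_self_of_nodup c.keys hcnd
  have hU : PySem.Set.union (PySem.Set.ofList b.keys) (PySem.Set.ofList c.keys)
      = b.keys ++ c.keys.filter (fun x => decide (x ∉ b.keys)) := by
    rw [hofb, hofc]
    show c.keys.foldl PySem.Set.add b.keys = _
    exact foldl_add_eq_append c.keys b.keys hcnd
  have hUnd : (b.keys ++ c.keys.filter (fun x => decide (x ∉ b.keys))).Nodup := by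
    refine List.Nodup.append hbnd (hcnd.filter _) ?_
    intro x hx hxf
    have := (List.mem_filter.1 hxf).2
    simp at this
    exact this hx
  -- A's loop over the union list appends exactly the filtered pairs
  have hA :
      ((PySem.Set.union (PySem.Set.ofList b.keys) (PySem.Set.ofList c.keys)).foldl (fun d key =>
          if PySem.Dict.getD b key none ≠ PySem.Dict.getD c key none
          then d.insert key (PySem.Dict.getD c key none) else d) PySem.Dict.empty).items
        = ((b.keys ++ c.keys.filter (fun x => decide (x ∉ b.keys))).filter
              (fun k => decide (PySem.Dict.getD b k none ≠ PySem.Dict.getD c k none))).map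
            (fun k => (k, PySem.Dict.getD c k none)) := by
    rw [hU]
    have := items_foldl_insert_if
        (fun k => PySem.Dict.getD b k none ≠ PySem.Dict.getD c k none)
        (fun k => k) (fun k => PySem.Dict.getD c k none)
        (b.keys ++ c.keys.filter (fun x => decide (x ∉ b.keys))) PySem.Dict.empty
        (by simpa [List.map_id'] using hUnd.filter _)
        (by intro a _ _; simp)
    simpa using this
  have hbitems : b.items = b.keys.map (fun k => (k, PySem.Dict.getD b k none)) :=
    PySem.Dict.items_eq_map_keys b hbnd none
  have hcitems : c.items = c.keys.map (fun k => (k, PySem.Dict.getD c k none)) :=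
    PySem.Dict.items_eq_map_keys c hcnd none
  -- B's first loop
  have hB1 :
      (b.items.foldl (fun d kv =>
          if PySem.Dict.getD c kv.1 none ≠ kv.2 then d.insert kv.1 (PySem.Dict.getD c kv.1 none) else d)
        PySem.Dict.empty).items
      = (b.keys.filter (fun k => decide (PySem.Dict.getD b k none ≠ PySem.Dict.getD c k none))).map
          (fun k => (k, PySem.Dict.getD c k none)) := by
    have hfnd : ((b.items.filter (fun kv => decide (PySem.Dict.getD c kv.1 none ≠ kv.2))).map
        Prod.fst).Nodup := by
      have hsub : ((b.items.filter (fun kv => decide (PySem.Dict.getD c kv.1 none ≠ kv.2))).map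
          Prod.fst).Sublist (b.items.map Prod.fst) := List.filter_sublist.map _
      exact List.Nodup.sublist hsub hbnd
    have h0 := items_foldl_insert_if
        (fun kv : String × Option Int => PySem.Dict.getD c kv.1 none ≠ kv.2)
        Prod.fst (fun kv => PySem.Dict.getD c kv.1 none) b.items PySem.Dict.empty
        hfnd (by intro a _ _; simp)
    rw [h0]
    have hemp : (PySem.Dict.empty : PySem.Dict String (Option Int)).items = [] := rfl
    rw [hemp, List.nil_append]
    conv_lhs => rw [hbitems]
    rw [List.filter_map, List.map_map]
    congr 1
    apply List.filter_congr
    intro k _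
    simp only [Function.comp_apply, decide_eq_decide]
    constructor
    · intro h hh; exact h (Eq.symm hh)
    · intro h hh; exact h (Eq.symm hh)
  generalize hd1 : (b.items.foldl (fun d kv =>
      if PySem.Dict.getD c kv.1 none ≠ kv.2 then d.insert kv.1 (PySem.Dict.getD c kv.1 none) else d)
    PySem.Dict.empty) = d1 at hB1 ⊢
  have hd1keys : ∀ k, d1.contains k = true → k ∈ b.keys := by
    intro k hk
    have hk' : k ∈ d1.keys := (PySem.Dict.contains_iff_mem_keys _ _).1 hk
    have hkeq : d1.keys = d1.items.map Prod.fst := by simp [PySem.Dict.keys]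
    rw [hkeq, hB1, List.map_map] at hk'
    obtain ⟨x, hx, hxe⟩ := List.mem_map.1 hk'
    simpa [← hxe] using List.mem_of_mem_filter hx
  -- B's second loop
  have hB2 :
      (c.items.foldl (fun d kv =>
          if PySem.Dict.contains b kv.1 = false ∧ kv.2 ≠ none then d.insert kv.1 kv.2 else d) d1).items
      = d1.items ++ (c.items.filter (fun kv =>
            decide (PySem.Dict.contains b kv.1 = false ∧ kv.2 ≠ none))).map
          (fun kv => (kv.1, kv.2)) := by
    have hfnd : ((c.items.filter (fun kv =>
        decide (PySem.Dict.contains b kv.1 = false ∧ kv.2 ≠ none))).map Prod.fst).Nodup := by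
      have hsub : ((c.items.filter (fun kv =>
          decide (PySem.Dict.contains b kv.1 = false ∧ kv.2 ≠ none))).map Prod.fst).Sublist
          (c.items.map Prod.fst) := List.filter_sublist.map _
      exact List.Nodup.sublist hsub hcnd
    exact items_foldl_insert_if
        (fun kv : String × Option Int => PySem.Dict.contains b kv.1 = false ∧ kv.2 ≠ none)
        Prod.fst Prod.snd c.items d1 hfnd
        (by
          intro a _ hpa
          by_cases h : d1.contains a.1 = true
          · exact absurd (hd1keys a.1 h) (by
              intro hm
              have hcm := (PySem.Dict.contains_iff_mem_keys _ _).2 hm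
              rw [hpa.1] at hcm
              exact Bool.false_ne_true hcm)
          · simpa using h)
  rw [hA, hB2, hB1]
  rw [List.filter_append, List.map_append]
  congr 1
  conv_rhs => rw [hcitems]
  rw [List.filter_map, List.map_map, List.filter_filter]
  congr 1
  apply List.filter_congr
  intro k hk
  simp only [Function.comp_apply]
  by_cases hmem : k ∈ b.keys
  · have hcont : PySem.Dict.contains b k = true := (PySem.Dict.contains_iff_mem_keys _ _).2 hmem
    simp [hmem, hcont]
  · have hnotc : PySem.Dict.contains b k = false := by
      by_contra h
      simp only [Bool.not_eq_false] at h
      exact hmem ((PySem.Dict.contains_iff_mem_keys _ _).1 h)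
    have hbv : PySem.Dict.getD b k none = none := PySem.Dict.getD_of_not_contains b none hnotc
    rw [hbv, hnotc]
    simp [hmem, eq_comm]

-- ===== VERDICT (by name: the statement is the Claim_ definition above) =====
theorem state_diff_py_spec : Claim_equal_state_diff_py := by
  intro base current _
  exact state_diff_eq base current
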